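-- pv_equiv track=rewrite | github.com/Mayner0220/Algorithm-Study | Brute-Force/Practice_test.py | solution
-- ===== SOURCE A (Python) =====
-- def solution(answers):
--     answer = []
--
--     solver1 = [1, 2, 3, 4, 5]
--     solver2 = [2, 1, 2, 3, 2, 4, 2, 5]
--     solver3 = [3, 3, 1, 1, 2, 2, 4, 4, 5, 5]
--
--     scores = [0, 0, 0]
--
--     for index in range(len(answers)):
--         if solver1[index % len(solver1)] == answers[index]:
--             scores[0] += 1
--
--         if solver2[index % len(solver2)] == answers[index]:
--             scores[1] += 1
--
--         if solver3[index % len(solver3)] == answers[index]: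
--             scores[2] += 1
--
--     for winner, score in enumerate(scores):
--         if score == max(scores):
--             answer.append(winner+1)
--
--     return answer
-- ===== SOURCE B (Python) =====
-- def solution(answers):
--     # Histogram pass: count how many times each value occurs at each
--     # position class modulo 40 (= lcm of the three guess periods 5, 8, 10).
--     hist = {}
--     for i, a in enumerate(answers):
--         key = (i % 40, a)
--         hist[key] = hist.get(key, 0) + 1
--     patterns = [[1, 2, 3, 4, 5],
--                 [2, 1, 2, 3, 2, 4, 2, 5],
--                 [3, 3, 1, 1, 2, 2, 4, 4, 5, 5]]
--     # Each solver's guess at position i depends only on i mod 40, so its score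
--     # is a sum of 40 histogram lookups -- no per-solver scan of the answers.
--     scores = [sum(hist.get((j, pat[j % len(pat)]), 0) for j in range(40))
--               for pat in patterns]
--     m = max(scores)
--     return [k + 1 for k, s in enumerate(scores) if s == m]
-- ===== Notes on version B (the rewrite author's own statement) =====
-- stated objective: alternative
-- what changed: A scores the three solvers by comparing every answer against modulo-indexed pattern entries in one interleaved loop; B scans the answers once to build a histogram keyed by (position mod 40, value) and then derives each solver's score as a sum of 40 table lookups, so no scoring pass ever touches the answers or compares them to a pattern.
import Mathlib
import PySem

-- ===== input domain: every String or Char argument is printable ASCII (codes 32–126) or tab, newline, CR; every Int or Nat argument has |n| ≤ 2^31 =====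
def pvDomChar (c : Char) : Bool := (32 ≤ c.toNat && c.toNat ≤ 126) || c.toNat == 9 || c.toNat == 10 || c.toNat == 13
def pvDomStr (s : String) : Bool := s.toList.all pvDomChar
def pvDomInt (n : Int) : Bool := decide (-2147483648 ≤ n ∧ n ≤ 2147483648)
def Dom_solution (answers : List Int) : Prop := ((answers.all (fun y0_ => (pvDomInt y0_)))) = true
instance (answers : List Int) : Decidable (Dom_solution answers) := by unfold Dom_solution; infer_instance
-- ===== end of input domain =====

-- B replaces A's interleaved pattern-comparison loop by a single histogram pass
-- keyed by (position mod 40, value) plus 40 table lookups per solver; objective: alternative.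

-- ===== PORT A =====
-- A: one loop over indices, updating the three scores (ported as a triple) together,
-- then a second loop appending winner+1 whenever the score equals max(scores).
def solution (answers : List Int) : List Int :=
  let solver1 : List Int := [1, 2, 3, 4, 5]
  let solver2 : List Int := [2, 1, 2, 3, 2, 4, 2, 5]
  let solver3 : List Int := [3, 3, 1, 1, 2, 2, 4, 4, 5, 5]
  let scores : Int × Int × Int :=
    (PySem.List.pyRange 0 (answers.length : Int) 1).foldl
      (fun scores index =>
        let scores :=
          if PySem.List.pyGetD solver1 (PySem.Int.mod index (solver1.length : Int)) 0
               = PySem.List.pyGetD answers index 0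
          then (scores.1 + 1, scores.2.1, scores.2.2) else scores
        let scores :=
          if PySem.List.pyGetD solver2 (PySem.Int.mod index (solver2.length : Int)) 0
               = PySem.List.pyGetD answers index 0
          then (scores.1, scores.2.1 + 1, scores.2.2) else scores
        if PySem.List.pyGetD solver3 (PySem.Int.mod index (solver3.length : Int)) 0
             = PySem.List.pyGetD answers index 0
        then (scores.1, scores.2.1, scores.2.2 + 1) else scores)
      (0, 0, 0)
  let scoresL : List Int := [scores.1, scores.2.1, scores.2.2]
  (PySem.List.enumerate scoresL).foldl
    (fun answer ws =>
      if ws.2 = (PySem.List.max? scoresL (id : Int → Int)).getD 0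
      then answer ++ [ws.1 + 1] else answer) []

-- ===== PORT B =====
-- B: one histogram pass over (i % 40, answers[i]); each solver's score is a sum of
-- 40 histogram lookups; winners by filtering the enumerated scores.
def solution_alt (answers : List Int) : List Int :=
  let hist : PySem.Dict (Int × Int) Int :=
    (PySem.List.enumerate answers).foldl
      (fun d p =>
        let key : Int × Int := (PySem.Int.mod p.1 40, p.2)
        d.insert key (d.getD key 0 + 1))
      PySem.Dict.empty
  let patterns : List (List Int) :=
    [[1, 2, 3, 4, 5], [2, 1, 2, 3, 2, 4, 2, 5], [3, 3, 1, 1, 2, 2, 4, 4, 5, 5]]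
  let scores : List Int := patterns.map (fun pat =>
    ((PySem.List.pyRange 0 40 1).map (fun j =>
        hist.getD (j, PySem.List.pyGetD pat (PySem.Int.mod j (pat.length : Int)) 0) 0)).sum)
  let m : Int := (PySem.List.max? scores (id : Int → Int)).getD 0
  ((PySem.List.enumerate scores).filter (fun x => decide (x.2 = m))).map (fun x => x.1 + 1)

-- ===== PRECONDITION & SPEC =====
def Spec_solution (answers : List Int) (out : List Int) : Prop := out = solution_alt answers
instance (answers : List Int) (out : List Int) : Decidable (Spec_solution answers out) := by unfold Spec_solution; infer_instance

-- ===== CLAIM (what is proved, stated in full; the proofs are below) =====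
def Claim_equal_solution : Prop := ∀ (answers : List Int), Dom_solution answers → Spec_solution answers (solution answers)

-- ===== LEMMAS AND PROOFS =====

-- reference count: number of positions i (counted from k) where pat[i % len pat] = answers[i]
def cntRef (pat : List Int) : List Int → Nat → Int
  | [], _ => 0
  | a :: as, k => (if pat.getD (k % pat.length) 0 = a then 1 else 0) + cntRef pat as (k + 1)

-- A's index loop, one component at a time, equals cntRef
lemma A_fold (pat full : List Int) :
    ∀ (d k : Nat) (s : Int), full.length = k + d →
      (PySem.List.pyRange (k : Int) (full.length : Int) 1).foldl
        (fun s j => s + (if PySem.List.pyGetD pat (PySem.Int.mod j (pat.length : Int)) 0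
                            = PySem.List.pyGetD full j 0 then 1 else 0)) s
      = s + cntRef pat (full.drop k) k := by
  intro d
  induction d with
  | zero =>
    intro k s hk
    have h1 : (full.length : Int) = (k : Int) := by omega
    rw [h1]
    have h2 : PySem.List.pyRange (k : Int) (k : Int) 1 = [] := by
      simp [PySem.List.pyRange]
    rw [h2]
    have h3 : full.drop k = [] := List.drop_eq_nil_of_le (by omega)
    simp [h3, cntRef]
  | succ d ih =>
    intro k s hk
    have hklt : k < full.length := by omega
    rw [PySem.List.pyRange_one_cons (by exact_mod_cast hklt)]
    rw [List.foldl_cons]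
    have hcast : ((k : Int) + 1) = ((k + 1 : Nat) : Int) := by push_cast; ring
    rw [hcast, ih (k + 1) _ (by omega)]
    have hdrop : full.drop k = full[k] :: full.drop (k + 1) :=
      List.drop_eq_getElem_cons hklt
    rw [hdrop]
    have hmod : PySem.Int.mod (k : Int) ((pat.length : Nat) : Int) = ((k % pat.length : Nat) : Int) :=
      PySem.Int.mod_natCast k pat.length
    rw [hmod, PySem.List.pyGetD_natCast, PySem.List.pyGetD_natCast]
    have hget : full.getD k 0 = full[k] := List.getD_eq_getElem full 0 hklt
    rw [hget]
    show _ + cntRef pat (full.drop (k+1)) (k+1) = s + cntRef pat (full[k] :: full.drop (k+1)) k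
    rw [cntRef]
    ring

-- a fold updating the three components independently splits into three folds
lemma foldl_prod3 {γ : Type} (l : List γ) (f g h : Int → γ → Int) (a b c : Int) :
    l.foldl (fun s x => (f s.1 x, g s.2.1 x, h s.2.2 x)) (a, b, c)
      = (l.foldl f a, l.foldl g b, l.foldl h c) := by
  induction l generalizing a b c with
  | nil => rfl
  | cons x t ih => simpa using ih (f a x) (g b x) (h c x)

-- the sum over a duplicate-free index list of indicators of one pair
lemma sum_indicator (keyf : Int → Int) (w : Int) :
    ∀ (js : List Int) (r : Int), js.Nodup → r ∈ js →
      (js.map (fun j => if ((j, keyf j) : Int × Int) = (r, w) then (1 : Int) else 0)).sum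
        = if w = keyf r then 1 else 0 := by
  intro js
  induction js with
  | nil => intro r _ hr; cases hr
  | cons j t ih =>
    intro r hnd hr
    rw [List.map_cons, List.sum_cons]
    by_cases hjr : j = r
    · have hrt : r ∉ t := hjr ▸ (List.nodup_cons.mp hnd).1
      have ht0 : (t.map (fun j' => if ((j', keyf j') : Int × Int) = (r, w) then (1 : Int) else 0)).sum = 0 := by
        apply List.sum_eq_zero
        intro x hx
        rcases List.mem_map.mp hx with ⟨j', hj', hx'⟩
        have hne : j' ≠ r := fun h => hrt (h ▸ hj')
        rw [if_neg (fun h => hne (congrArg Prod.fst h))] at hx'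
        exact hx'.symm
      rw [ht0, add_zero, hjr]
      by_cases hw : w = keyf r
      · rw [if_pos (by rw [hw]), if_pos hw]
      · rw [if_neg (fun h => hw (congrArg Prod.snd h).symm), if_neg hw]
    · have hrt : r ∈ t := (List.mem_cons.mp hr).resolve_left (fun h => hjr h.symm)
      rw [if_neg (fun h => hjr (congrArg Prod.fst h)), zero_add]
      exact ih r (List.nodup_cons.mp hnd).2 hrt
lemma sum_count_eq_countP (js : List Int) (hnd : js.Nodup) (keyf : Int → Int) :
    ∀ (l : List (Int × Int)), (∀ q ∈ l, q.1 ∈ js) →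
      (js.map (fun j => (l.count ((j, keyf j) : Int × Int) : Int))).sum
        = ((l.countP (fun q => decide (q.2 = keyf q.1)) : Nat) : Int) := by
  intro l
  induction l with
  | nil => intro _; simp
  | cons q t ih =>
    intro hmem
    have hq : q.1 ∈ js := hmem q List.mem_cons_self
    have hc : ∀ j : Int, ((q :: t).count ((j, keyf j) : Int × Int) : Int)
        = (t.count ((j, keyf j) : Int × Int) : Int)
          + (if ((j, keyf j) : Int × Int) = (q.1, q.2) then (1 : Int) else 0) := by
      intro j
      rw [List.count_cons]
      by_cases h : ((j, keyf j) : Int × Int) = (q.1, q.2)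
      · rw [if_pos h]; push_cast
        simp [Prod.mk.eta.symm.trans h.symm]
      · rw [if_neg h]
        simp [show ¬ q = ((j, keyf j) : Int × Int) from fun hh => h (hh.symm.trans Prod.mk.eta.symm)]
    calc (js.map (fun j => ((q :: t).count ((j, keyf j) : Int × Int) : Int))).sum
        = (js.map (fun j => (t.count ((j, keyf j) : Int × Int) : Int)
            + (if ((j, keyf j) : Int × Int) = (q.1, q.2) then (1 : Int) else 0))).sum := by
          exact congrArg List.sum (List.map_congr_left (fun j _ => hc j))
      _ = (js.map (fun j => (t.count ((j, keyf j) : Int × Int) : Int))).sum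
            + (js.map (fun j => (if ((j, keyf j) : Int × Int) = (q.1, q.2) then (1 : Int) else 0))).sum := by
          rw [← List.sum_map_add]
      _ = ((t.countP (fun q => decide (q.2 = keyf q.1)) : Nat) : Int)
            + (if q.2 = keyf q.1 then (1 : Int) else 0) := by
          rw [ih (fun p hp => hmem p (List.mem_cons_of_mem q hp)),
              sum_indicator keyf q.2 js q.1 hnd hq]
      _ = (((q :: t).countP (fun q => decide (q.2 = keyf q.1)) : Nat) : Int) := by
          rw [List.countP_cons]
          by_cases h : q.2 = keyf q.1 <;> simp [h]
lemma mod_mod_40 (i : Int) (L : Int) (hL : 0 < L) (hdvd : L ∣ 40) :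
    PySem.Int.mod (PySem.Int.mod i 40) L = PySem.Int.mod i L := by
  rw [PySem.Int.mod_eq_emod_of_pos (show (0:Int) < 40 by norm_num),
      PySem.Int.mod_eq_emod_of_pos hL, PySem.Int.mod_eq_emod_of_pos hL]
  exact Int.emod_emod_of_dvd i hdvd
lemma countP_enum (pat : List Int) :
    ∀ (xs : List Int) (k : Nat),
      (((PySem.List.enumerate xs (k : Int)).countP
          (fun p => decide (p.2 = PySem.List.pyGetD pat (PySem.Int.mod p.1 (pat.length : Int)) 0)) : Nat) : Int)
        = cntRef pat xs k := by
  intro xs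
  induction xs with
  | nil => intro k; simp [PySem.List.enumerate_nil, cntRef]
  | cons a t ih =>
    intro k
    rw [PySem.List.enumerate_cons, List.countP_cons]
    have hmod : PySem.Int.mod (k : Int) ((pat.length : Nat) : Int) = ((k % pat.length : Nat) : Int) :=
      PySem.Int.mod_natCast k pat.length
    have hcond : (decide (a = PySem.List.pyGetD pat (PySem.Int.mod (k : Int) (pat.length : Int)) 0))
        = (decide (pat.getD (k % pat.length) 0 = a)) := by
      rw [hmod, PySem.List.pyGetD_natCast]
      exact decide_eq_decide.mpr eq_comm
    rw [cntRef]
    push_cast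
    rw [show ((k : Int) + 1) = ((k + 1 : Nat) : Int) from by push_cast; ring, ih (k + 1)]
    simp only [hcond] at *
    simp only [decide_eq_true_eq]
    split_ifs with h <;> ring
lemma hist_getD (answers : List Int) (key : Int × Int) :
    ((PySem.List.enumerate answers).foldl
      (fun d p =>
        d.insert ((PySem.Int.mod p.1 40, p.2) : Int × Int)
          (d.getD ((PySem.Int.mod p.1 40, p.2) : Int × Int) 0 + 1))
      PySem.Dict.empty).getD key 0
    = (((PySem.List.enumerate answers).map (fun p => ((PySem.Int.mod p.1 40, p.2) : Int × Int))).count key : Int) := by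
  have h := PySem.Dict.getD_foldl_insert_add_one
    (l := (PySem.List.enumerate answers).map (fun p => ((PySem.Int.mod p.1 40, p.2) : Int × Int)))
    (d := (PySem.Dict.empty : PySem.Dict (Int × Int) Int)) (v := key)
  have he : (PySem.Dict.empty : PySem.Dict (Int × Int) Int).getD key 0 = 0 := rfl
  rw [List.foldl_map, he, zero_add] at h
  exact h

-- B's 40-lookup sum for one pattern equals cntRef
lemma B_score (pat answers : List Int) (hL : 0 < (pat.length : Int)) (hdvd : (pat.length : Int) ∣ 40) :
    ((PySem.List.pyRange 0 40 1).map (fun j =>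
        ((PySem.List.enumerate answers).foldl
          (fun d p =>
            d.insert ((PySem.Int.mod p.1 40, p.2) : Int × Int)
              (d.getD ((PySem.Int.mod p.1 40, p.2) : Int × Int) 0 + 1))
          PySem.Dict.empty).getD
          (j, PySem.List.pyGetD pat (PySem.Int.mod j (pat.length : Int)) 0) 0)).sum
    = cntRef pat answers 0 := by
  have h1 : ∀ j : Int,
      ((PySem.List.enumerate answers).foldl
        (fun d p =>
          d.insert ((PySem.Int.mod p.1 40, p.2) : Int × Int)
            (d.getD ((PySem.Int.mod p.1 40, p.2) : Int × Int) 0 + 1))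
        PySem.Dict.empty).getD
        (j, PySem.List.pyGetD pat (PySem.Int.mod j (pat.length : Int)) 0) 0
      = (((PySem.List.enumerate answers).map (fun p => ((PySem.Int.mod p.1 40, p.2) : Int × Int))).count
          ((j, PySem.List.pyGetD pat (PySem.Int.mod j (pat.length : Int)) 0) : Int × Int) : Int) :=
    fun j => hist_getD answers _
  rw [List.map_congr_left (fun j _ => h1 j)]
  have h2 := sum_count_eq_countP (PySem.List.pyRange 0 40 1) (PySem.List.nodup_pyRange_one 0 40)
      (fun j => PySem.List.pyGetD pat (PySem.Int.mod j (pat.length : Int)) 0)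
      ((PySem.List.enumerate answers).map (fun p => ((PySem.Int.mod p.1 40, p.2) : Int × Int)))
      (by
        intro q hq
        rcases List.mem_map.mp hq with ⟨p, _, hp⟩
        rw [← hp]
        rw [PySem.List.mem_pyRange_one]
        exact ⟨PySem.Int.mod_nonneg _ (by norm_num), PySem.Int.mod_lt _ (by norm_num)⟩)
  rw [h2, List.countP_map]
  have h3 : ((fun q : Int × Int => decide (q.2 = PySem.List.pyGetD pat
        (PySem.Int.mod q.1 (pat.length : Int)) 0))
      ∘ (fun p : Int × Int => ((PySem.Int.mod p.1 40, p.2) : Int × Int)))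
      = (fun p : Int × Int => decide (p.2 = PySem.List.pyGetD pat (PySem.Int.mod p.1 (pat.length : Int)) 0)) := by
    funext p
    simp only [Function.comp]
    rw [mod_mod_40 p.1 (pat.length : Int) hL hdvd]
  rw [h3]
  exact_mod_cast countP_enum pat answers 0

-- the two winner-collection passes agree for any three scores
lemma winners_eq (a b c : Int) :
    (PySem.List.enumerate [a, b, c]).foldl
      (fun answer ws =>
        if ws.2 = (PySem.List.max? [a, b, c] (id : Int → Int)).getD 0
        then answer ++ [ws.1 + 1] else answer) []
    = ((PySem.List.enumerate [a, b, c]).filter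
        (fun x => decide (x.2 = (PySem.List.max? [a, b, c] (id : Int → Int)).getD 0))).map
        (fun x => x.1 + 1) := by
  have he : ∀ x y z : Int, PySem.List.enumerate [x, y, z] = [(0, x), (1, y), (2, z)] := by
    intro x y z; rfl
  rw [he]
  simp only [List.foldl_cons, List.foldl_nil, List.filter_cons, List.filter_nil,
    decide_eq_true_eq]
  split_ifs <;> rfl

-- ===== VERDICT (by name: the statement is the Claim_ definition above) =====
theorem solution_spec : Claim_equal_solution := by
  intro answers _
  unfold Spec_solution solution solution_alt
  simp only []
  have hb : (PySem.List.pyRange 0 ((answers.length : Nat) : Int) 1).foldl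
      (fun (scores : Int × Int × Int) (index : Int) =>
        let scores :=
          if PySem.List.pyGetD [1,2,3,4,5] (PySem.Int.mod index (([1,2,3,4,5] : List Int).length : Int)) 0
               = PySem.List.pyGetD answers index 0
          then (scores.1 + 1, scores.2.1, scores.2.2) else scores
        let scores :=
          if PySem.List.pyGetD [2,1,2,3,2,4,2,5] (PySem.Int.mod index (([2,1,2,3,2,4,2,5] : List Int).length : Int)) 0
               = PySem.List.pyGetD answers index 0
          then (scores.1, scores.2.1 + 1, scores.2.2) else scores
          if PySem.List.pyGetD [3,3,1,1,2,2,4,4,5,5] (PySem.Int.mod index (([3,3,1,1,2,2,4,4,5,5] : List Int).length : Int)) 0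
               = PySem.List.pyGetD answers index 0
          then (scores.1, scores.2.1, scores.2.2 + 1) else scores) (0, 0, 0)
      = ((PySem.List.pyRange 0 ((answers.length : Nat) : Int) 1).foldl (fun (x : Int) (j : Int) => x + (if PySem.List.pyGetD [1,2,3,4,5] (PySem.Int.mod j (([1,2,3,4,5] : List Int).length : Int)) 0 = PySem.List.pyGetD answers j 0 then 1 else 0)) 0,
         (PySem.List.pyRange 0 ((answers.length : Nat) : Int) 1).foldl (fun (x : Int) (j : Int) => x + (if PySem.List.pyGetD [2,1,2,3,2,4,2,5] (PySem.Int.mod j (([2,1,2,3,2,4,2,5] : List Int).length : Int)) 0 = PySem.List.pyGetD answers j 0 then 1 else 0)) 0,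
         (PySem.List.pyRange 0 ((answers.length : Nat) : Int) 1).foldl (fun (x : Int) (j : Int) => x + (if PySem.List.pyGetD [3,3,1,1,2,2,4,4,5,5] (PySem.Int.mod j (([3,3,1,1,2,2,4,4,5,5] : List Int).length : Int)) 0 = PySem.List.pyGetD answers j 0 then 1 else 0)) 0) := by
    rw [show (fun (scores : Int × Int × Int) (index : Int) =>
        let scores :=
          if PySem.List.pyGetD [1,2,3,4,5] (PySem.Int.mod index (([1,2,3,4,5] : List Int).length : Int)) 0
               = PySem.List.pyGetD answers index 0
          then (scores.1 + 1, scores.2.1, scores.2.2) else scores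
        let scores :=
          if PySem.List.pyGetD [2,1,2,3,2,4,2,5] (PySem.Int.mod index (([2,1,2,3,2,4,2,5] : List Int).length : Int)) 0
               = PySem.List.pyGetD answers index 0
          then (scores.1, scores.2.1 + 1, scores.2.2) else scores
          if PySem.List.pyGetD [3,3,1,1,2,2,4,4,5,5] (PySem.Int.mod index (([3,3,1,1,2,2,4,4,5,5] : List Int).length : Int)) 0
               = PySem.List.pyGetD answers index 0
          then (scores.1, scores.2.1, scores.2.2 + 1) else scores)
      = (fun (s : Int × Int × Int) (j : Int) => ((fun (x : Int) (j : Int) => x + (if PySem.List.pyGetD [1,2,3,4,5] (PySem.Int.mod j (([1,2,3,4,5] : List Int).length : Int)) 0 = PySem.List.pyGetD answers j 0 then 1 else 0)) s.1 j, (fun (x : Int) (j : Int) => x + (if PySem.List.pyGetD [2,1,2,3,2,4,2,5] (PySem.Int.mod j (([2,1,2,3,2,4,2,5] : List Int).length : Int)) 0 = PySem.List.pyGetD answers j 0 then 1 else 0)) s.2.1 j, (fun (x : Int) (j : Int) => x + (if PySem.List.pyGetD [3,3,1,1,2,2,4,4,5,5] (PySem.Int.mod j (([3,3,1,1,2,2,4,4,5,5]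 : List Int).length : Int)) 0 = PySem.List.pyGetD answers j 0 then 1 else 0)) s.2.2 j))
      from by funext s j; dsimp only; split_ifs <;> simp]
    exact foldl_prod3 _ (fun (x : Int) (j : Int) => x + (if PySem.List.pyGetD [1,2,3,4,5] (PySem.Int.mod j (([1,2,3,4,5] : List Int).length : Int)) 0 = PySem.List.pyGetD answers j 0 then 1 else 0)) (fun (x : Int) (j : Int) => x + (if PySem.List.pyGetD [2,1,2,3,2,4,2,5] (PySem.Int.mod j (([2,1,2,3,2,4,2,5] : List Int).length : Int)) 0 = PySem.List.pyGetD answers j 0 then 1 else 0)) (fun (x : Int) (j : Int) => x + (if PySem.List.pyGetD [3,3,1,1,2,2,4,4,5,5] (PySem.Int.mod j (([3,3,1,1,2,2,4,4,5,5] : List Int).length : Int)) 0 = PySem.List.pyGetD answers j 0 then 1 else 0)) 0 0 0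
  rw [hb]
  have hA1 := A_fold [1,2,3,4,5] answers answers.length 0 0 (Nat.zero_add _).symm
  have hA2 := A_fold [2,1,2,3,2,4,2,5] answers answers.length 0 0 (Nat.zero_add _).symm
  have hA3 := A_fold [3,3,1,1,2,2,4,4,5,5] answers answers.length 0 0 (Nat.zero_add _).symm
  simp only [Nat.cast_zero, List.drop_zero, zero_add] at hA1 hA2 hA3
  rw [hA1, hA2, hA3]
  simp only [List.map_cons, List.map_nil]
  simp only [B_score [1,2,3,4,5] answers (by norm_num) (by norm_num),
      B_score [2,1,2,3,2,4,2,5] answers (by norm_num) (by norm_num),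
      B_score [3,3,1,1,2,2,4,4,5,5] answers (by norm_num) (by norm_num)]
  exact winners_eq _ _ _
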